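-- pv_equiv track=rewrite | github.com/uchytilc/pycu | driver/core/memory.py | generate_strides
-- ===== SOURCE A (Python) =====
-- def generate_strides(shape, itemsize, order = 'C'):
-- 	if order == 'C':
-- 		shape = reversed(shape)
--
-- 	strides = []
-- 	stride = itemsize
-- 	for dim in shape:
-- 		strides.insert(0, stride)
-- 		stride *= dim
--
-- 	if order == 'F':
-- 		strides = reversed(strides)
--
-- 	return tuple(strides)
-- ===== SOURCE B (Python) =====
-- def _prod(xs):
--     p = 1
--     for x in xs:
--         p *= x
--     return p
--
-- def generate_strides(shape, itemsize, order='C'):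
--     dims = list(shape)
--     if order == 'C':
--         dims = dims[::-1]
--     res = [itemsize * _prod(dims[:k]) for k in range(len(dims))]
--     if order != 'F':
--         res = res[::-1]
--     return tuple(res)
-- ===== Notes on version B (the rewrite author's own statement) =====
-- stated objective: alternative
-- what changed: Replaces the running-accumulator loop with insert(0,...) by independent per-index prefix products (stride k = itemsize * prod of the first k dims), building the list forward and reversing into final position.
import Mathlib
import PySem

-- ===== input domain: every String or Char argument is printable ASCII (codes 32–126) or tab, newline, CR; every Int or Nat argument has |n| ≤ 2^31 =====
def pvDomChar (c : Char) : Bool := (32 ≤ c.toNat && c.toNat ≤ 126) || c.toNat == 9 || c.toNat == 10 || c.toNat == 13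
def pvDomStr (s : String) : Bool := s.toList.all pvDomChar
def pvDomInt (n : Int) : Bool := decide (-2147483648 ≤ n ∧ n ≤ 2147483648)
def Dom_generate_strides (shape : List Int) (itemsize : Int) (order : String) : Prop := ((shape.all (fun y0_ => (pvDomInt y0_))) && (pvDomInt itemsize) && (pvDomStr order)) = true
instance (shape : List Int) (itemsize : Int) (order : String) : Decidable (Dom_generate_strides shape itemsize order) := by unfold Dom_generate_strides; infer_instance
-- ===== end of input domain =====

-- B builds each stride as an independent prefix product instead of A's running accumulator with insert(0,...); alternative decomposition, same results.

-- ===== PORT A =====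
-- the for-loop over `shape`: state is (strides, stride); `strides.insert(0, stride)` is cons
def generate_strides (shape : List Int) (itemsize : Int) (order : String) : List Int :=
  let shape := if order == "C" then shape.reverse else shape
  let st := shape.foldl (fun (acc : List Int × Int) dim => (acc.2 :: acc.1, acc.2 * dim)) ([], itemsize)
  if order == "F" then st.1.reverse else st.1

-- ===== PORT B =====
-- _prod helper of Source B
def pvProd (xs : List Int) : Int := xs.foldl (· * ·) 1

def generate_strides_alt (shape : List Int) (itemsize : Int) (order : String) : List Int :=
  let dims := if order == "C" then shape.reverse else shape
  let res := (List.range dims.length).map (fun k => itemsize * pvProd (dims.take k))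
  if order != "F" then res.reverse else res

-- ===== PRECONDITION & SPEC =====
def Spec_generate_strides (shape : List Int) (itemsize : Int) (order : String) (out : List Int) : Prop := out = generate_strides_alt shape itemsize order
instance (shape : List Int) (itemsize : Int) (order : String) (out : List Int) : Decidable (Spec_generate_strides shape itemsize order out) := by unfold Spec_generate_strides; infer_instance

-- ===== CLAIM (what is proved, stated in full; the proofs are below) =====
def Claim_equal_generate_strides : Prop := ∀ (shape : List Int) (itemsize : Int) (order : String), Dom_generate_strides shape itemsize order → Spec_generate_strides shape itemsize order (generate_strides shape itemsize order)

-- ===== LEMMAS AND PROOFS =====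

theorem pvProd_cons (a : Int) (xs : List Int) : pvProd (a :: xs) = a * pvProd xs := by
  unfold pvProd
  simp only [List.foldl_cons, one_mul]
  induction xs generalizing a with
  | nil => simp
  | cons b t ih =>
    simp only [List.foldl_cons]
    rw [ih (a * b), ih (1 * b)]
    ring

-- the loop invariant: A's fold from accumulator (acc, s) over dims
theorem foldA (dims : List Int) (acc : List Int) (s : Int) :
    dims.foldl (fun (p : List Int × Int) dim => (p.2 :: p.1, p.2 * dim)) (acc, s)
      = (((List.range dims.length).map (fun k => s * pvProd (dims.take k))).reverse ++ acc,
         s * pvProd dims) := by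
  induction dims generalizing acc s with
  | nil => simp [pvProd]
  | cons d t ih =>
    simp only [List.foldl_cons]
    rw [ih (s :: acc) (s * d)]
    refine Prod.ext ?_ ?_
    · have hmap : (List.range t.length).map (fun k => s * d * pvProd (t.take k))
          = (List.range t.length).map (fun k => s * pvProd ((d :: t).take (k + 1))) := by
        apply List.map_congr_left
        intro k _
        simp [List.take_succ_cons, pvProd_cons, mul_assoc]
      rw [hmap]
      rw [List.length_cons, List.range_succ_eq_map]
      simp [Function.comp, List.take_succ_cons, pvProd]
    · rw [pvProd_cons, mul_assoc]

-- ===== VERDICT (by name: the statement is the Claim_ definition above) =====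
theorem generate_strides_spec : Claim_equal_generate_strides := by
  intro shape itemsize order _
  unfold Spec_generate_strides generate_strides generate_strides_alt
  simp only
  rw [foldA]
  by_cases hF : order = "F"
  · subst hF; simp
  · simp [hF]
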